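-- pv_equiv track=rewrite | github.com/feinglong/PythonVideoPoker | flask_poker/fonctions.py | decompose_jeu
-- ===== SOURCE A (Python) =====
-- def decompose_jeu(tirage):
--     dic = {}
--     indices = range(len(tirage))
--     valeur =[]
--     couleur= []
--     for i,x in zip(indices, tirage):
--         dic[i] = x.split('-')
--     for x in dic:
--         valeur.append(dic[x][0])
--         couleur.append(dic[x][1])
--     return valeur, couleur
-- ===== SOURCE B (Python) =====
-- def decompose_jeu(tirage):
--     valeur = []
--     couleur = []
--     for card in tirage:
--         parts = card.split('-')
--         valeur.append(parts[0])
--         couleur.append(parts[1])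
--     return valeur, couleur
-- ===== Notes on version B (the rewrite author's own statement) =====
-- stated objective: simpler
-- what changed: Drops A's intermediate index-to-parts dictionary and its second loop over the dict keys: B splits each card and appends its two components in one direct pass over the list.
import Mathlib
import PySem

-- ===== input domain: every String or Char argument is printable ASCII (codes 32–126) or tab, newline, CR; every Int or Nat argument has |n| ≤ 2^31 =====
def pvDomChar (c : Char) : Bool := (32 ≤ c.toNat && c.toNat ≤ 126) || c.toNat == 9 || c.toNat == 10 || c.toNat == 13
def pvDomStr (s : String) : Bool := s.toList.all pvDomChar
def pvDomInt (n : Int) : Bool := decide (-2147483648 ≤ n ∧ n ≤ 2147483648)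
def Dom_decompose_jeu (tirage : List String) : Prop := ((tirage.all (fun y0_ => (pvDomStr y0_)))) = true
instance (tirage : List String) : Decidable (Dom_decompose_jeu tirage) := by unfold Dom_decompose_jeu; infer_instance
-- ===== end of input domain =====

-- B drops A's intermediate index→parts dictionary and second loop, splitting and appending in one direct pass; equal on Pre_ (every card contains '-').

-- ===== PORT A =====
-- split? with the non-empty literal "-" is always some (.getD [] unreachable); dic[x] never misses (x iterates dic's own keys), so getD [] is exact; parts[0]/[1] via pyGet?,
-- whose none case (IndexError) is excluded by Pre_ and replaced by .getD "".
def decompose_jeu (tirage : List String) : List String × List String :=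
  let dic : PySem.Dict Int (List String) :=
    ((PySem.List.pyRange 0 tirage.length 1).zip tirage).foldl
      (fun d p => d.insert p.1 ((PySem.Str.split? p.2 "-").getD [])) PySem.Dict.empty
  dic.keys.foldl
    (fun vc x =>
      (vc.1 ++ [(PySem.List.pyGet? (dic.getD x []) 0).getD ""],
       vc.2 ++ [(PySem.List.pyGet? (dic.getD x []) 1).getD ""]))
    ([], [])

-- ===== PORT B =====
def decompose_jeu_alt (tirage : List String) : List String × List String :=
  tirage.foldl
    (fun vc card =>
      let parts := (PySem.Str.split? card "-").getD []
      (vc.1 ++ [(PySem.List.pyGet? parts 0).getD ""],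
       vc.2 ++ [(PySem.List.pyGet? parts 1).getD ""]))
    ([], [])

-- ===== PRECONDITION & SPEC =====
-- Pre_ excludes exactly the cards with no '-': there parts[1] raises IndexError in both Pythons.
def Pre_decompose_jeu (tirage : List String) : Prop :=
  (tirage.all (fun s => s.toList.contains '-')) = true
instance (tirage : List String) : Decidable (Pre_decompose_jeu tirage) := by
  unfold Pre_decompose_jeu; infer_instance
def pvWitness_decompose_jeu : List String := ["7-coeur", "as-pique", "10-trefle"]
def Spec_decompose_jeu (tirage : List String) (out : List String × List String) : Prop := out = decompose_jeu_alt tirage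
instance (tirage : List String) (out : List String × List String) : Decidable (Spec_decompose_jeu tirage out) := by unfold Spec_decompose_jeu; infer_instance

-- ===== CLAIM (what is proved, stated in full; the proofs are below) =====
def Claim_equal_decompose_jeu : Prop := ∀ (tirage : List String), Dom_decompose_jeu tirage → Pre_decompose_jeu tirage → Spec_decompose_jeu tirage (decompose_jeu tirage)

-- ===== LEMMAS AND PROOFS =====

-- ===== VERDICT (by name: the statement is the Claim_ definition above) =====
theorem decompose_jeu_spec : Claim_equal_decompose_jeu := by
  intro tirage _ _
  unfold Spec_decompose_jeu
  simp only [decompose_jeu, decompose_jeu_alt]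
  have hlenr : (PySem.List.pyRange 0 (tirage.length : Int) 1).length = tirage.length := by
    simp [PySem.List.length_pyRange_one]
  set sp : String → List String := fun card => (PySem.Str.split? card "-").getD [] with hsp
  set rng := PySem.List.pyRange 0 (tirage.length : Int) 1 with hrng
  set l := rng.zip tirage with hl
  have hfst : l.map Prod.fst = rng := List.map_fst_zip (le_of_eq hlenr)
  have hsnd : l.map Prod.snd = tirage := List.map_snd_zip (le_of_eq hlenr.symm)
  set dic := l.foldl (fun d p => d.insert p.1 (sp p.2)) PySem.Dict.empty with hdic
  have hitems : dic.items = l.map (fun p => (p.1, sp p.2)) := by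
    have h := PySem.Dict.items_foldl_insert_fresh l Prod.fst (fun p => sp p.2) PySem.Dict.empty
      (fun a _ => by simp) (by rw [hfst]; exact PySem.List.nodup_pyRange_one 0 _)
    simpa using h
  have hkeys : dic.keys = rng := by
    simp only [PySem.Dict.keys, hitems, List.map_map]
    exact hfst
  have hnk : dic.keys.Nodup := by rw [hkeys]; exact PySem.List.nodup_pyRange_one 0 _
  have hget : ∀ p ∈ l, dic.getD p.1 [] = sp p.2 := by
    intro p hp
    exact PySem.Dict.getD_of_mem_items dic
      (by rw [hitems]; exact List.mem_map_of_mem hp) hnk []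
  calc
    dic.keys.foldl
        (fun vc x =>
          (vc.1 ++ [(PySem.List.pyGet? (dic.getD x []) 0).getD ""],
           vc.2 ++ [(PySem.List.pyGet? (dic.getD x []) 1).getD ""]))
        ([], [])
      = l.foldl
        (fun vc p =>
          (vc.1 ++ [(PySem.List.pyGet? (dic.getD p.1 []) 0).getD ""],
           vc.2 ++ [(PySem.List.pyGet? (dic.getD p.1 []) 1).getD ""]))
        ([], []) := by
        rw [hkeys, ← hfst, List.foldl_map]
    _ = l.foldl
        (fun vc p =>
          (vc.1 ++ [(PySem.List.pyGet? (sp p.2) 0).getD ""],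
           vc.2 ++ [(PySem.List.pyGet? (sp p.2) 1).getD ""]))
        ([], []) := by
        apply PySem.List.foldl_congr_mem
        intro acc p hp
        rw [hget p hp]
    _ = tirage.foldl
        (fun vc card =>
          (vc.1 ++ [(PySem.List.pyGet? (sp card) 0).getD ""],
           vc.2 ++ [(PySem.List.pyGet? (sp card) 1).getD ""]))
        ([], []) := by
        rw [← hsnd, List.foldl_map]
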